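-- pv_equiv track=rewrite | github.com/ObEngine/Obidog | obidog/parsers/type_parser.py | split_unembedded
-- ===== SOURCE A (Python) =====
-- from typing import List, Optional, Tuple, Union
--
-- def split_unembedded(string: str, sep: str, embed_symbols: List[Tuple[str, str]]):
--     stack = []
--     segments = []
--     buffer = ""
--     opening_symbols = [sym[0] for sym in embed_symbols]
--     closing_symbols = [sym[1] for sym in embed_symbols]
--     for char in string:
--         if char in opening_symbols:
--             stack.append(char)
--             buffer = buffer + char
--         elif char in closing_symbols:
--             if opening_symbols.index(stack[-1]) != closing_symbols.index(char):
--                 raise RuntimeError("unbalanced opening / closing symbols")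
--             stack.pop(len(stack) - 1)
--             buffer = buffer + char
--         elif char == sep and not stack:
--             segments.append(buffer.strip())
--             buffer = ""
--         else:
--             buffer = buffer + char
--     if buffer.strip():
--         segments.append(buffer.strip())
--     return [segment.strip() for segment in segments]
-- ===== SOURCE B (Python) =====
-- def split_unembedded(string, sep, embed_symbols):
--     opening_symbols = [sym[0] for sym in embed_symbols]
--     closing_symbols = [sym[1] for sym in embed_symbols]
--
--     def find_cut(s):
--         stack = []
--         for i, char in enumerate(s):
--             if char in opening_symbols:
--                 stack.append(char)
--             elif char in closing_symbols:
--                 if opening_symbols.index(stack[-1]) != closing_symbols.index(char):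
--                     raise RuntimeError("unbalanced opening / closing symbols")
--                 stack.pop()
--             elif char == sep and not stack:
--                 return i
--         return None
--
--     segments = []
--     rest = string
--     i = find_cut(rest)
--     while i is not None:
--         segments.append(rest[:i].strip())
--         rest = rest[i + 1:]
--         i = find_cut(rest)
--     tail = rest.strip()
--     if tail:
--         segments.append(tail)
--     return segments
-- ===== Notes on version B (the rewrite author's own statement) =====
-- stated objective: alternative
-- what changed: B discards A's incremental buffered scan entirely: a helper find_cut locates the next top-level separator by index, and a while loop repeatedly slices the segment off the front of the remaining string and restarts the search on the remainder, instead of A's single pass that accumulates characters into a buffer and flushes it at each separator.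
import Mathlib
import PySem

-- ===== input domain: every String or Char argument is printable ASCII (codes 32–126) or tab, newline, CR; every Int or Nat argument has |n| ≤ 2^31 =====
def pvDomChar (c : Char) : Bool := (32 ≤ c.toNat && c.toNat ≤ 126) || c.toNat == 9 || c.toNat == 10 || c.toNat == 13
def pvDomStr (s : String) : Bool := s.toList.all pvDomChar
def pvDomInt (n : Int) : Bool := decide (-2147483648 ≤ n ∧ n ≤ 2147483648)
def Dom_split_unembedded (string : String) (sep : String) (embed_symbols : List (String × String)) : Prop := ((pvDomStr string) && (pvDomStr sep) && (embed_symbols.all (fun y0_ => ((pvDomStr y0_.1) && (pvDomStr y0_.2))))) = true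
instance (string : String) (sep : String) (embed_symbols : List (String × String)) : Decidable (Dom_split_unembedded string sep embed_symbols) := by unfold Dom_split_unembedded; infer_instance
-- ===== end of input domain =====

-- B replaces A's single buffered scan by repeated find-next-top-level-separator searches that slice the
-- remaining string (alternative decomposition, same observable behaviour).

-- ===== PORT A =====
-- one step of A's for-loop; state = (stack, segments, buffer)
def pvAStep (sep : String) (opening closing : List String) (st : List String × List String × List Char) (char : Char) : List String × List String × List Char :=
  if String.ofList [char] ∈ opening then (st.1 ++ [String.ofList [char]], st.2.1, st.2.2 ++ [char])
  else if String.ofList [char] ∈ closing then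
    match st.1.getLast? with
    | none => st   -- Python: stack[-1] raises IndexError here; excluded by Pre_
    | some top =>
      if PySem.List.index? opening top ≠ PySem.List.index? closing (String.ofList [char]) then st   -- Python: RuntimeError; excluded by Pre_
      else (st.1.dropLast, st.2.1, st.2.2 ++ [char])
  else if String.ofList [char] = sep ∧ st.1 = [] then (st.1, st.2.1 ++ [String.ofList (PySem.Chars.strip st.2.2)], [])
  else (st.1, st.2.1, st.2.2 ++ [char])

def split_unembedded (string : String) (sep : String) (embed_symbols : List (String × String)) : List String :=
  let opening := embed_symbols.map (fun sym => sym.1)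
  let closing := embed_symbols.map (fun sym => sym.2)
  let fin := string.toList.foldl (pvAStep sep opening closing) ([], [], [])
  let segments := if PySem.Chars.strip fin.2.2 ≠ [] then fin.2.1 ++ [String.ofList (PySem.Chars.strip fin.2.2)] else fin.2.1
  segments.map (fun segment => PySem.Str.strip segment)

-- ===== PORT B =====
-- B's helper find_cut: for-loop over enumerate(s) with early return; returns the index of the first
-- separator at nesting depth 0, none if there is none (or where Python raises; excluded by Pre_)
def pvFindCut (sep : String) (opening closing : List String) : List Char → List String → Nat → Option Nat
  | [], _, _ => none
  | ch :: rest, stack, i =>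
    if String.ofList [ch] ∈ opening then pvFindCut sep opening closing rest (stack ++ [String.ofList [ch]]) (i + 1)
    else if String.ofList [ch] ∈ closing then
      match stack.getLast? with
      | none => none   -- Python: stack[-1] raises IndexError here; excluded by Pre_
      | some top =>
        if PySem.List.index? opening top ≠ PySem.List.index? closing (String.ofList [ch]) then none   -- Python: RuntimeError; excluded by Pre_
        else pvFindCut sep opening closing rest stack.dropLast (i + 1)
    else if String.ofList [ch] = sep ∧ stack = [] then some i
    else pvFindCut sep opening closing rest stack (i + 1)

-- termination fact for B's while loop (cited in decreasing_by)
theorem pvFindCut_lt (sep : String) (o cl : List String) :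
    ∀ (s : List Char) (stack : List String) (i j : Nat),
    pvFindCut sep o cl s stack i = some j → j < i + s.length := by
  intro s
  induction s with
  | nil => intro stack i j h; simp [pvFindCut] at h
  | cons ch rest ih =>
    intro stack i j h
    unfold pvFindCut at h
    split_ifs at h with h1 h2 h3
    · have := ih _ _ _ h; simp; omega
    · rcases hl : stack.getLast? with _ | top
      · rw [hl] at h; exact absurd h (by simp)
      · rw [hl] at h; dsimp only at h
        split_ifs at h with h4
        have := ih _ _ _ h; simp; omega
    · simp at h; simp [h]
    · have := ih _ _ _ h; simp; omega

-- B's while loop: slice off the segment before the cut, strip it, continue on the remainder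
def pvGo (sep : String) (opening closing : List String) (rest : List Char) (segments : List String) : List String :=
  match h : pvFindCut sep opening closing rest [] 0 with
  | some i => pvGo sep opening closing (rest.drop (i + 1)) (segments ++ [String.ofList (PySem.Chars.strip (rest.take i))])   -- rest[:i].strip(); rest = rest[i+1:] (i ≥ 0 so take/drop are exact)
  | none =>
    let tail := PySem.Chars.strip rest
    if tail ≠ [] then segments ++ [String.ofList tail] else segments
termination_by rest.length
decreasing_by
  have hlt := pvFindCut_lt sep opening closing rest [] 0 i h
  simp at hlt ⊢
  omega

def split_unembedded_alt (string : String) (sep : String) (embed_symbols : List (String × String)) : List String :=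
  let opening := embed_symbols.map (fun sym => sym.1)
  let closing := embed_symbols.map (fun sym => sym.2)
  pvGo sep opening closing string.toList []

-- ===== PRECONDITION & SPEC =====
-- the minimal well-nestedness scan: tracks only the nesting stack, none = A raises (IndexError on an
-- unmatched closing symbol, RuntimeError on a mismatched pair); Pre_ excludes exactly those inputs
def pvScan (opening closing : List String) (st? : Option (List String)) (char : Char) : Option (List String) :=
  match st? with
  | none => none
  | some stack =>
    if String.ofList [char] ∈ opening then some (stack ++ [String.ofList [char]])
    else if String.ofList [char] ∈ closing then
      match stack.getLast? with
      | none => none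
      | some top =>
        if PySem.List.index? opening top ≠ PySem.List.index? closing (String.ofList [char]) then none
        else some stack.dropLast
    else some stack

-- Pre_ excludes exactly the inputs on which A raises (unbalanced / mismatched embed symbols)
def Pre_split_unembedded (string : String) (sep : String) (embed_symbols : List (String × String)) : Prop :=
  (string.toList.foldl (pvScan (embed_symbols.map (fun sym => sym.1)) (embed_symbols.map (fun sym => sym.2))) (some [])).isSome = true

instance (string : String) (sep : String) (embed_symbols : List (String × String)) : Decidable (Pre_split_unembedded string sep embed_symbols) := by
  unfold Pre_split_unembedded; infer_instance

def pvWitness_split_unembedded : String × String × (List (String × String)) := ("a(b, c), d", ",", [("(", ")")])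

def Spec_split_unembedded (string : String) (sep : String) (embed_symbols : List (String × String)) (out : List String) : Prop := out = split_unembedded_alt string sep embed_symbols
instance (string : String) (sep : String) (embed_symbols : List (String × String)) (out : List String) : Decidable (Spec_split_unembedded string sep embed_symbols out) := by unfold Spec_split_unembedded; infer_instance

-- ===== CLAIM (what is proved, stated in full; the proofs are below) =====
def Claim_equal_split_unembedded : Prop := ∀ (string : String) (sep : String) (embed_symbols : List (String × String)), Dom_split_unembedded string sep embed_symbols → Pre_split_unembedded string sep embed_symbols → Spec_split_unembedded string sep embed_symbols (split_unembedded string sep embed_symbols)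

-- ===== LEMMAS AND PROOFS =====

theorem pv_dw_idem {α : Type} (p : α → Bool) (l : List α) :
    List.dropWhile p (List.dropWhile p l) = List.dropWhile p l := by
  induction l with
  | nil => simp
  | cons a t ih =>
    rw [List.dropWhile_cons]
    split_ifs with h
    · exact ih
    · rw [List.dropWhile_cons, if_neg h]

theorem pv_rstrip_prefix (y : List Char) : PySem.Chars.rstrip y <+: y := by
  have h := List.dropWhile_suffix (l := y.reverse) (p := PySem.Chars.isspace)
  simpa [PySem.Chars.rstrip, ← List.reverse_suffix] using h

theorem pv_dropWhile_rstrip (y : List Char) (h : List.dropWhile PySem.Chars.isspace y = y) :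
    List.dropWhile PySem.Chars.isspace (PySem.Chars.rstrip y) = PySem.Chars.rstrip y := by
  rcases hr : PySem.Chars.rstrip y with _ | ⟨a, t⟩
  · simp
  · have hp : PySem.Chars.rstrip y <+: y := pv_rstrip_prefix y
    rw [hr] at hp
    rcases hp with ⟨s, hs⟩
    subst hs
    simp only [List.cons_append] at h
    rw [List.dropWhile_cons] at h ⊢
    split_ifs at h ⊢ with hsp
    · have hlen := congrArg List.length h
      have hle := List.length_dropWhile_le (p := PySem.Chars.isspace) (l := t ++ s)
      simp only [List.length_cons, List.length_append] at hlen hle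
      omega
    · rfl

theorem pv_rstrip_idem (y : List Char) : PySem.Chars.rstrip (PySem.Chars.rstrip y) = PySem.Chars.rstrip y := by
  simp [PySem.Chars.rstrip, pv_dw_idem]

theorem pv_strip_idem (l : List Char) : PySem.Chars.strip (PySem.Chars.strip l) = PySem.Chars.strip l := by
  unfold PySem.Chars.strip PySem.Chars.lstrip
  rw [pv_dropWhile_rstrip _ (pv_dw_idem _ l), pv_rstrip_idem]

theorem pv_strip_fix (l : List Char) :
    PySem.Str.strip (String.ofList (PySem.Chars.strip l)) = String.ofList (PySem.Chars.strip l) := by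
  simp [PySem.Str.strip, pv_strip_idem]

theorem pv_scan_none (o cl : List String) (l : List Char) :
    l.foldl (pvScan o cl) none = none := by
  induction l with
  | nil => rfl
  | cons a t ih => simpa [pvScan] using ih

-- shifting find_cut's start index shifts its result
theorem pvFindCut_shift (sep : String) (o cl : List String) :
    ∀ (s : List Char) (stack : List String) (i : Nat),
    pvFindCut sep o cl s stack i = (pvFindCut sep o cl s stack 0).map (· + i) := by
  intro s
  induction s with
  | nil => intro stack i; simp [pvFindCut]
  | cons ch rest ih =>
    intro stack i
    unfold pvFindCut
    split_ifs with h1 h2 h3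
    · rcases hF : pvFindCut sep o cl rest (stack ++ [String.ofList [ch]]) 0 with _ | j <;>
        simp [ih _ (i + 1), ih _ 1, hF] <;> omega
    · rcases hl : stack.getLast? with _ | top <;> dsimp only
      · simp
      · split_ifs with h4
        · simp
        · rcases hF : pvFindCut sep o cl rest stack.dropLast 0 with _ | j <;>
            simp [ih _ (i + 1), ih _ 1, hF] <;> omega
    · simp
    · rcases hF : pvFindCut sep o cl rest stack 0 with _ | j <;>
        simp [ih _ (i + 1), ih _ 1, hF] <;> omega

-- the core correspondence: between two cuts, A's fold only extends the buffer, and at a cut it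
-- flushes exactly the slice B's find_cut identifies
theorem pvInner (sep : String) (o cl : List String) :
    ∀ (s : List Char) (stack segs : List String) (buf : List Char),
    (s.foldl (pvScan o cl) (some stack)).isSome = true →
    (pvFindCut sep o cl s stack 0 = none →
       ∃ st', s.foldl (pvAStep sep o cl) (stack, segs, buf) = (st', segs, buf ++ s)) ∧
    (∀ j, pvFindCut sep o cl s stack 0 = some j →
       j < s.length ∧
       s.foldl (pvAStep sep o cl) (stack, segs, buf)
         = (s.drop (j + 1)).foldl (pvAStep sep o cl)
             ([], segs ++ [String.ofList (PySem.Chars.strip (buf ++ s.take j))], []) ∧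
       ((s.drop (j + 1)).foldl (pvScan o cl) (some [])).isSome = true) := by
  intro s
  induction s with
  | nil =>
    intro stack segs buf _
    exact ⟨fun _ => ⟨stack, by simp⟩, fun j h => by simp [pvFindCut] at h⟩
  | cons ch rest ih =>
    intro stack segs buf hScan
    have hfold : (ch :: rest).foldl (pvScan o cl) (some stack)
        = rest.foldl (pvScan o cl) (pvScan o cl (some stack) ch) := rfl
    by_cases hco : String.ofList [ch] ∈ o
    · -- opening symbol
      have hstep : pvScan o cl (some stack) ch = some (stack ++ [String.ofList [ch]]) := by
        simp [pvScan, hco]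
      rw [hfold, hstep] at hScan
      have hA : pvAStep sep o cl (stack, segs, buf) ch
          = (stack ++ [String.ofList [ch]], segs, buf ++ [ch]) := by simp [pvAStep, hco]
      have hFC : pvFindCut sep o cl (ch :: rest) stack 0
          = (pvFindCut sep o cl rest (stack ++ [String.ofList [ch]]) 0).map (· + 1) := by
        conv_lhs => unfold pvFindCut
        rw [if_pos hco, pvFindCut_shift]
      obtain ⟨ihN, ihS⟩ := ih (stack ++ [String.ofList [ch]]) segs (buf ++ [ch]) hScan
      constructor
      · intro hnone
        rw [hFC] at hnone
        rcases hF : pvFindCut sep o cl rest (stack ++ [String.ofList [ch]]) 0 with _ | j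
        · obtain ⟨st', hst'⟩ := ihN hF
          exact ⟨st', by rw [List.foldl_cons, hA, hst']; simp⟩
        · rw [hF] at hnone; simp at hnone
      · intro j hj
        rw [hFC] at hj
        rcases hF : pvFindCut sep o cl rest (stack ++ [String.ofList [ch]]) 0 with _ | j'
        · rw [hF] at hj; simp at hj
        · rw [hF] at hj; simp at hj
          obtain ⟨h1, h2, h3⟩ := ihS j' hF
          subst hj
          refine ⟨by simp; omega, ?_, by simpa using h3⟩
          rw [List.foldl_cons, hA, h2]
          simp [List.take_succ_cons]
    · by_cases hcc : String.ofList [ch] ∈ cl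
      · -- closing symbol: Pre_ forces a matching top of stack
        rcases hl : stack.getLast? with _ | top
        · have : pvScan o cl (some stack) ch = none := by simp [pvScan, hco, hcc, hl]
          rw [hfold, this, pv_scan_none] at hScan; simp at hScan
        · by_cases hix : PySem.List.index? o top ≠ PySem.List.index? cl (String.ofList [ch])
          · have : pvScan o cl (some stack) ch = none := by
              simp only [PySem.List.index?_eq_idxOf?] at hix
              simp [pvScan, hco, hcc, hl, hix]
            rw [hfold, this, pv_scan_none] at hScan; simp at hScan
          · rw [not_ne_iff] at hix
            have hix' := hix
            simp only [PySem.List.index?_eq_idxOf?] at hix'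
            have hstep : pvScan o cl (some stack) ch = some stack.dropLast := by
              simp [pvScan, hco, hcc, hl, hix']
            rw [hfold, hstep] at hScan
            have hA : pvAStep sep o cl (stack, segs, buf) ch
                = (stack.dropLast, segs, buf ++ [ch]) := by
              simp [pvAStep, hco, hcc, hl, hix']
            have hFC : pvFindCut sep o cl (ch :: rest) stack 0
                = (pvFindCut sep o cl rest stack.dropLast 0).map (· + 1) := by
              conv_lhs => unfold pvFindCut
              rw [if_neg hco, if_pos hcc, hl]
              dsimp only
              rw [if_neg (by simp [hix']), pvFindCut_shift]
            obtain ⟨ihN, ihS⟩ := ih stack.dropLast segs (buf ++ [ch]) hScan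
            constructor
            · intro hnone
              rw [hFC] at hnone
              rcases hF : pvFindCut sep o cl rest stack.dropLast 0 with _ | j
              · obtain ⟨st', hst'⟩ := ihN hF
                exact ⟨st', by rw [List.foldl_cons, hA, hst']; simp⟩
              · rw [hF] at hnone; simp at hnone
            · intro j hj
              rw [hFC] at hj
              rcases hF : pvFindCut sep o cl rest stack.dropLast 0 with _ | j'
              · rw [hF] at hj; simp at hj
              · rw [hF] at hj; simp at hj
                obtain ⟨h1, h2, h3⟩ := ihS j' hF
                subst hj
                refine ⟨by simp; omega, ?_, by simpa using h3⟩
                rw [List.foldl_cons, hA, h2]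
                simp [List.take_succ_cons]
      · by_cases hsep : String.ofList [ch] = sep ∧ stack = []
        · -- separator at depth 0: A flushes here, B's find_cut stops here
          obtain ⟨hs1, hs2⟩ := hsep
          have hstep : pvScan o cl (some stack) ch = some stack := by simp [pvScan, hco, hcc]
          rw [hfold, hstep, hs2] at hScan
          have hA : pvAStep sep o cl (stack, segs, buf) ch
              = (stack, segs ++ [String.ofList (PySem.Chars.strip buf)], []) := by
            simp [pvAStep, hco, hcc, hs2, ← hs1]
          have hFC : pvFindCut sep o cl (ch :: rest) stack 0 = some 0 := by
            unfold pvFindCut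
            rw [if_neg hco, if_neg hcc, if_pos ⟨hs1, hs2⟩]
          constructor
          · intro hnone; rw [hFC] at hnone; simp at hnone
          · intro j hj
            rw [hFC] at hj
            have hj0 : j = 0 := by simpa using hj.symm
            subst hj0
            refine ⟨by simp, ?_, hScan⟩
            rw [List.foldl_cons, hA, hs2]
            simp
        · -- ordinary character
          have hstep : pvScan o cl (some stack) ch = some stack := by simp [pvScan, hco, hcc]
          rw [hfold, hstep] at hScan
          have hA : pvAStep sep o cl (stack, segs, buf) ch = (stack, segs, buf ++ [ch]) := by
            simp only [pvAStep, if_neg hco, if_neg hcc, if_neg hsep]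
          have hFC : pvFindCut sep o cl (ch :: rest) stack 0
              = (pvFindCut sep o cl rest stack 0).map (· + 1) := by
            conv_lhs => unfold pvFindCut
            rw [if_neg hco, if_neg hcc, if_neg hsep, pvFindCut_shift]
          obtain ⟨ihN, ihS⟩ := ih stack segs (buf ++ [ch]) hScan
          constructor
          · intro hnone
            rw [hFC] at hnone
            rcases hF : pvFindCut sep o cl rest stack 0 with _ | j
            · obtain ⟨st', hst'⟩ := ihN hF
              exact ⟨st', by rw [List.foldl_cons, hA, hst']; simp⟩
            · rw [hF] at hnone; simp at hnone
          · intro j hj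
            rw [hFC] at hj
            rcases hF : pvFindCut sep o cl rest stack 0 with _ | j'
            · rw [hF] at hj; simp at hj
            · rw [hF] at hj; simp at hj
              obtain ⟨h1, h2, h3⟩ := ihS j' hF
              subst hj
              refine ⟨by simp; omega, ?_, by simpa using h3⟩
              rw [List.foldl_cons, hA, h2]
              simp [List.take_succ_cons]

-- main: A's fold-plus-finish (with its final redundant strips) equals B's cut-by-cut loop
theorem pvOuter (sep : String) (o cl : List String) :
    ∀ (n : Nat) (s : List Char) (segs : List String),
    s.length ≤ n →
    (s.foldl (pvScan o cl) (some [])).isSome = true →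
    (∀ x ∈ segs, PySem.Str.strip x = x) →
    ((let f := s.foldl (pvAStep sep o cl) ([], segs, []);
      if PySem.Chars.strip f.2.2 ≠ [] then f.2.1 ++ [String.ofList (PySem.Chars.strip f.2.2)] else f.2.1).map
        (fun segment => PySem.Str.strip segment))
      = pvGo sep o cl s segs := by
  intro n
  induction n with
  | zero =>
    intro s segs hlen hScan hfix
    have hs : s = [] := List.eq_nil_of_length_eq_zero (by omega)
    subst hs
    rw [pvGo]
    simp [pvFindCut, PySem.Chars.strip, PySem.Chars.lstrip, PySem.Chars.rstrip, List.map_congr_left hfix]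
  | succ n ihn =>
    intro s segs hlen hScan hfix
    rcases hF : pvFindCut sep o cl s [] 0 with _ | j
    · -- no top-level separator left
      obtain ⟨st', hst'⟩ := (pvInner sep o cl s [] segs [] hScan).1 hF
      rw [pvGo, hF]
      simp only [hst', List.nil_append]
      split_ifs with h
      · rw [List.map_append, List.map_congr_left hfix]
        simp [pv_strip_fix]
      · rw [List.map_congr_left hfix]; exact List.map_id _
    · -- cut at j: flush the slice, continue on the remainder
      obtain ⟨hjlt, heq, hScan'⟩ := (pvInner sep o cl s [] segs [] hScan).2 j hF
      rw [pvGo, hF]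
      simp only [List.nil_append] at heq
      rw [heq]
      exact ihn (s.drop (j + 1)) (segs ++ [String.ofList (PySem.Chars.strip (s.take j))])
        (by simp; omega) hScan'
        (by intro x hx
            rcases List.mem_append.1 hx with hx | hx
            · exact hfix x hx
            · rw [List.mem_singleton] at hx; subst hx; exact pv_strip_fix _)

-- ===== VERDICT (by name: the statement is the Claim_ definition above) =====
theorem split_unembedded_spec : Claim_equal_split_unembedded := by
  intro string sep embed _hDom hPre
  unfold Pre_split_unembedded at hPre
  have h := pvOuter sep (embed.map (fun sym => sym.1)) (embed.map (fun sym => sym.2))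
    string.toList.length string.toList [] le_rfl hPre (by simp)
  exact h
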